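-- pv_equiv track=rewrite | github.com/Mizore66/AAAA-LOreal-Datathon-2025 | src/data_processing.py | extract_all_terms
-- ===== SOURCE A (Python) =====
-- from typing import List, Optional, Dict, Tuple, Set
--
-- STOPWORDS = set(
--     "the a an and or of in to for with on at from by is are was were be been being this that these those it its as if then than also not no but so very can will just into over under above below you your we our their they i me my mine out up down across about after before during between within without more less".split()
-- )
--
-- def extract_ngrams(text: str, n: int = 2) -> List[str]:
--     """Extract n-grams from cleaned text."""
--     if not isinstance(text, str) or not text.strip():
--         return []
--
--     words = text.split()
--     # Filter out very short words and stopwords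
--     words = [w for w in words if len(w) >= 3 and w.lower() not in STOPWORDS]
--
--     if len(words) < n:
--         return []
--
--     ngrams = []
--     for i in range(len(words) - n + 1):
--         ngram = " ".join(words[i:i+n])
--         ngrams.append(ngram)
--
--     return ngrams
--
-- def extract_all_terms(text: str, min_length: int = 3) -> List[str]:
--     """Extract all meaningful terms from text (words + phrases)."""
--     if not isinstance(text, str):
--         return []
--
--     terms = []
--     words = text.split()
--
--     # Add individual words (filtered)
--     for word in words:
--         if len(word) >= min_length and word.lower() not in STOPWORDS:
--             terms.append(word)
--
--     # Add bigrams and trigrams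
--     terms.extend(extract_ngrams(text, 2))
--     terms.extend(extract_ngrams(text, 3))
--
--     return terms
-- ===== SOURCE B (Python) =====
-- from typing import List
--
-- STOPWORDS = set(
--     "the a an and or of in to for with on at from by is are was were be been being this that these those it its as if then than also not no but so very can will just into over under above below you your we our their they i me my mine out up down across about after before during between within without more less".split()
-- )
--
-- def extract_all_terms(text: str, min_length: int = 3) -> List[str]:
--     """One streaming pass: words are classified once; bigrams/trigrams are built
--     on the fly from the last two kept n-gram words instead of by slicing passes."""
--     if not isinstance(text, str):
--         return []
--     unis, bis, tris = [], [], []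
--     p2 = p1 = None  # the two most recent words that passed the n-gram filter
--     for w in text.split():
--         stop = w.lower() in STOPWORDS
--         if not stop and len(w) >= min_length:
--             unis.append(w)
--         if not stop and len(w) >= 3:
--             if p1 is not None:
--                 bis.append(p1 + " " + w)
--                 if p2 is not None:
--                     tris.append(p2 + " " + p1 + " " + w)
--             p2, p1 = p1, w
--     return unis + bis + tris
-- ===== Notes on version B (the rewrite author's own statement) =====
-- stated objective: alternative
-- what changed: Replaces A's three staged passes (word filter pass, then a fresh split+filter+index/slice loop per n-gram size) by a single streaming pass that classifies each word once and emits bigrams/trigrams incrementally from the last two kept words held in two scalar state variables, with no slicing and no re-splitting.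
import Mathlib
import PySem

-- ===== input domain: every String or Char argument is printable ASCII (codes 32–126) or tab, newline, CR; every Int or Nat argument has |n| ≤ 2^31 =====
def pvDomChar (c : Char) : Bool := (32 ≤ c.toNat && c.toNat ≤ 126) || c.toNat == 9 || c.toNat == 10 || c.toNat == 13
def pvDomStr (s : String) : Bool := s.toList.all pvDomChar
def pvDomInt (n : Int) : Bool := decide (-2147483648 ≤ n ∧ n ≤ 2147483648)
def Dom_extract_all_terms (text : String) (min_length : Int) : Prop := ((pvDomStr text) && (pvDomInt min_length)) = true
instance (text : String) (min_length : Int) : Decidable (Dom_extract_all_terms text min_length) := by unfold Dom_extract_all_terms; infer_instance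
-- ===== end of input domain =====

-- B does one streaming pass: each word is classified once and bigrams/trigrams are emitted
-- incrementally from the last two kept words (objective: alternative — no slices, no re-splitting).

-- ===== PORT A =====
-- STOPWORDS = set("…".split()) — the module-level constant both Pythons share
def pvSTOPWORDS : PySem.Set String := PySem.Set.ofList (PySem.Str.split₀ "the a an and or of in to for with on at from by is are was were be been being this that these those it its as if then than also not no but so very can will just into over under above below you your we our their they i me my mine out up down across about after before during between within without more less")

-- 'len(w) >= m and w.lower() not in STOPWORDS' — A's filter test
def pvKeep (m : Int) (w : String) : Bool :=
  decide (m ≤ PySem.Str.len w) && !(PySem.Set.contains pvSTOPWORDS (PySem.Str.lower w))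

def extract_ngrams (text : String) (n : Int) : List String :=
  if PySem.Str.strip text = "" then []
  else
    let words := PySem.Str.split₀ text
    let words := words.filter (pvKeep 3)
    if PySem.List.len words < n then []
    else
      (PySem.List.pyRange 0 (PySem.List.len words - n + 1) 1).foldl
        (fun ngrams i =>
          ngrams ++ [PySem.Str.join " " (PySem.List.slice words (some i) (some (i + n)))]) []

def extract_all_terms (text : String) (min_length : Int) : List String :=
  let terms : List String := []
  let words := PySem.Str.split₀ text
  let terms := words.foldl
    (fun terms word => if pvKeep min_length word then terms ++ [word] else terms) terms
  let terms := terms ++ extract_ngrams text 2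
  let terms := terms ++ extract_ngrams text 3
  terms

-- ===== PORT B =====
-- the loop body of B: state is (unis, bis, tris, p2, p1); p1/p2 = last two kept n-gram words
def pvStepB (min_length : Int)
    (st : List String × List String × List String × Option String × Option String)
    (w : String) : List String × List String × List String × Option String × Option String :=
  match st with
  | (unis, bis, tris, p2, p1) =>
    let stop := PySem.Set.contains pvSTOPWORDS (PySem.Str.lower w)
    let unis := if !stop && decide (min_length ≤ PySem.Str.len w) then unis ++ [w] else unis
    if !stop && decide ((3 : Int) ≤ PySem.Str.len w) then
      match p1 with
      | some p =>
          (unis, bis ++ [p ++ " " ++ w],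
           (match p2 with
            | some q => tris ++ [q ++ " " ++ p ++ " " ++ w]
            | none => tris),
           some p, some w)
      | none => (unis, bis, tris, p1, some w)
    else (unis, bis, tris, p2, p1)

def extract_all_terms_alt (text : String) (min_length : Int) : List String :=
  let st := (PySem.Str.split₀ text).foldl (pvStepB min_length) ([], [], [], none, none)
  st.1 ++ st.2.1 ++ st.2.2.1

-- ===== PRECONDITION & SPEC =====
def Spec_extract_all_terms (text : String) (min_length : Int) (out : List String) : Prop := out = extract_all_terms_alt text min_length
instance (text : String) (min_length : Int) (out : List String) : Decidable (Spec_extract_all_terms text min_length out) := by unfold Spec_extract_all_terms; infer_instance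

-- ===== CLAIM (what is proved, stated in full; the proofs are below) =====
def Claim_equal_extract_all_terms : Prop := ∀ (text : String) (min_length : Int), Dom_extract_all_terms text min_length → Spec_extract_all_terms text min_length (extract_all_terms text min_length)

-- ===== LEMMAS AND PROOFS =====

-- spec of B's streaming bigrams over the kept words (p1 = previous kept word)
def pvB : Option String → List String → List String
  | _, [] => []
  | p1, w :: l =>
      (match p1 with | some p => [p ++ " " ++ w] | none => []) ++ pvB (some w) l

-- spec of B's streaming trigrams over the kept words
def pvT : Option String → Option String → List String → List String
  | _, _, [] => []
  | p2, p1, w :: l =>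
      (match p2, p1 with
       | some q, some p => [q ++ " " ++ p ++ " " ++ w]
       | _, _ => []) ++ pvT p1 (some w) l

-- spec of B's (p2, p1) state after the kept words
def pvL : Option String × Option String → List String → Option String × Option String
  | st, [] => st
  | (_, p1), w :: l => pvL (p1, some w) l

-- " ".join of two / three words is the same string as B's '+' concatenation
lemma pvJoin2 (a b : String) : PySem.Str.join " " [a, b] = a ++ " " ++ b := by
  have h : (PySem.Str.join " " [a, b]).toList = (a ++ " " ++ b).toList := by
    simp [PySem.Str.join, PySem.Chars.join_cons_cons, PySem.Chars.join_singleton]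
  exact String.toList_inj.mp h

lemma pvJoin3 (a b c : String) :
    PySem.Str.join " " [a, b, c] = a ++ " " ++ b ++ " " ++ c := by
  have h : (PySem.Str.join " " [a, b, c]).toList = (a ++ " " ++ b ++ " " ++ c).toList := by
    simp [PySem.Str.join, PySem.Chars.join_cons_cons, PySem.Chars.join_singleton]
  exact String.toList_inj.mp h

-- B's fold, characterised: unigram filter, streaming bigrams/trigrams over the kept words
lemma pv_foldB (m : Int) (ws : List String) (unis bis tris : List String)
    (p2 p1 : Option String) :
    ws.foldl (pvStepB m) (unis, bis, tris, p2, p1)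
      = (unis ++ ws.filter (pvKeep m),
         bis ++ pvB p1 (ws.filter (pvKeep 3)),
         tris ++ pvT p2 p1 (ws.filter (pvKeep 3)),
         pvL (p2, p1) (ws.filter (pvKeep 3))) := by
  induction ws generalizing unis bis tris p2 p1 with
  | nil => simp [pvB, pvT, pvL]
  | cons w l ih =>
      have e3 : (!(PySem.Set.contains pvSTOPWORDS (PySem.Str.lower w))
            && decide ((3 : Int) ≤ PySem.Str.len w)) = pvKeep 3 w := by
        simp [pvKeep, Bool.and_comm]
      have em : (!(PySem.Set.contains pvSTOPWORDS (PySem.Str.lower w))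
            && decide (m ≤ PySem.Str.len w)) = pvKeep m w := by
        simp [pvKeep, Bool.and_comm]
      simp only [List.foldl_cons, pvStepB, e3, em]
      by_cases h3 : pvKeep 3 w <;> by_cases hm : pvKeep m w <;>
        cases p1 with
        | none =>
            simp [h3, hm, ih, pvB, pvT, pvL]
        | some p =>
            cases p2 <;> simp [h3, hm, ih, pvB, pvT, pvL]

-- streaming bigrams with a known previous word = zip pairing
lemma pvB_some (p : String) (l : List String) :
    pvB (some p) l = ((p :: l).zip l).map (fun q => q.1 ++ " " ++ q.2) := by
  induction l generalizing p with
  | nil => simp [pvB]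
  | cons w r ih => simp [pvB, ih]

lemma pvB_none (l : List String) :
    pvB none l = (l.zip (l.drop 1)).map (fun q => q.1 ++ " " ++ q.2) := by
  cases l with
  | nil => simp [pvB]
  | cons w r => simpa [pvB] using pvB_some w r

-- streaming trigrams with two known previous words = zip pairing
lemma pvT_some (q p : String) (l : List String) :
    pvT (some q) (some p) l
      = ((q :: p :: l).zip ((p :: l).zip l)).map
          (fun t => t.1 ++ " " ++ t.2.1 ++ " " ++ t.2.2) := by
  induction l generalizing q p with
  | nil => simp [pvT]
  | cons w r ih => simp [pvT, ih]

lemma pvT_none (l : List String) :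
    pvT none none l
      = (l.zip ((l.drop 1).zip (l.drop 2))).map
          (fun t => t.1 ++ " " ++ t.2.1 ++ " " ++ t.2.2) := by
  cases l with
  | nil => simp [pvT]
  | cons w r =>
      cases r with
      | nil => simp [pvT]
      | cons v s => simpa [pvT] using pvT_some w v s

-- all-whitespace input makes split₀.go return just the accumulated pieces
lemma pv_go_spaces (cs : List Char) (acc : List (List Char))
    (h : ∀ c ∈ cs, PySem.Chars.isspace c = true) :
    PySem.Chars.split₀.go cs [] acc = acc.reverse := by
  induction cs generalizing acc with
  | nil => simp [PySem.Chars.split₀.go]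
  | cons c rest ih =>
      have hc := h c (by simp)
      simp only [PySem.Chars.split₀.go, hc, if_pos, List.isEmpty_nil]
      exact ih acc (fun x hx => h x (by simp [hx]))

-- text.strip() == '' → text.split() == []
lemma pv_split₀_of_strip_empty (s : String) (h : PySem.Str.strip s = "") :
    PySem.Str.split₀ s = [] := by
  have hsp : ∀ c ∈ s.toList, PySem.Chars.isspace c = true := by
    have h' : PySem.Chars.strip s.toList = [] := by
      have := congrArg String.toList h
      simpa [PySem.Str.strip] using this
    unfold PySem.Chars.strip PySem.Chars.rstrip PySem.Chars.lstrip at h'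
    rw [List.reverse_eq_nil_iff, List.dropWhile_eq_nil_iff] at h'
    intro c hc
    by_cases hmem : c ∈ List.dropWhile PySem.Chars.isspace s.toList
    · exact h' c (by simpa using hmem)
    · have hsplit := List.takeWhile_append_dropWhile (p := PySem.Chars.isspace) (l := s.toList)
      have : c ∈ List.takeWhile PySem.Chars.isspace s.toList := by
        rw [← hsplit] at hc
        rcases List.mem_append.mp hc with h1 | h2
        · exact h1
        · exact absurd h2 hmem
      exact List.mem_takeWhile_imp this
  simp only [PySem.Str.split₀, PySem.Chars.split₀]
  rw [pv_go_spaces s.toList [] hsp]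
  simp

-- index windows of length 2 = zip pairing
lemma pv_zip2 (ws : List String) :
    (List.range (ws.length - 1)).map (fun k => (ws.drop k).take 2)
      = (ws.zip (ws.drop 1)).map (fun p => [p.1, p.2]) := by
  induction ws with
  | nil => simp
  | cons a t ih =>
      cases t with
      | nil => simp
      | cons b t' =>
          have : (a :: b :: t').length - 1 = ((b :: t').length - 1) + 1 := by
            simp [List.length_cons]
          rw [this, List.range_succ_eq_map]
          simp only [List.map_cons, List.map_map, Function.comp_def, Nat.succ_eq_add_one,
            List.drop_succ_cons, List.drop_zero, List.zip_cons_cons]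
          rw [ih]
          simp

-- index windows of length 3 = zip pairing
lemma pv_zip3 (ws : List String) :
    (List.range (ws.length - 2)).map (fun k => (ws.drop k).take 3)
      = (ws.zip ((ws.drop 1).zip (ws.drop 2))).map (fun t => [t.1, t.2.1, t.2.2]) := by
  induction ws with
  | nil => simp
  | cons a t ih =>
      cases t with
      | nil => simp
      | cons b t' =>
          cases t' with
          | nil => simp
          | cons c t'' =>
              have : (a :: b :: c :: t'').length - 2 = ((b :: c :: t'').length - 2) + 1 := by
                simp [List.length_cons]
              rw [this, List.range_succ_eq_map]
              simp only [List.map_cons, List.map_map, Function.comp_def, Nat.succ_eq_add_one,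
                List.drop_succ_cons, List.drop_zero, List.zip_cons_cons]
              rw [ih]
              simp

-- slice with cast-free numerals
lemma pv_slice2 (ws : List String) (k : Nat) :
    PySem.List.slice ws (some (k : Int)) (some ((k : Int) + 2)) = (ws.drop k).take 2 := by
  have := PySem.List.slice_natCast_add ws k 2
  simpa using this

lemma pv_slice3 (ws : List String) (k : Nat) :
    PySem.List.slice ws (some (k : Int)) (some ((k : Int) + 3)) = (ws.drop k).take 3 := by
  have := PySem.List.slice_natCast_add ws k 3
  simpa using this

-- A's range/slice n-gram loop equals zip pairing, for n = 2
lemma pv_ngram2 (ws : List String) :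
    (PySem.List.pyRange 0 (PySem.List.len ws - 2 + 1) 1).foldl
        (fun acc i => acc ++ [PySem.Str.join " " (PySem.List.slice ws (some i) (some (i + 2)))]) []
      = (ws.zip (ws.drop 1)).map (fun p => PySem.Str.join " " [p.1, p.2]) := by
  rw [PySem.List.foldl_append_singleton_eq_map, PySem.List.pyRange_one, List.map_map]
  have hlen : (PySem.List.len ws - 2 + 1 - 0).toNat = ws.length - 1 := by
    simp [PySem.List.len_eq]; omega
  rw [hlen]
  have h2 := congrArg (List.map (fun w => PySem.Str.join " " w)) (pv_zip2 ws)
  simp only [List.map_map] at h2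
  have hc : ∀ k ∈ List.range (ws.length - 1),
      ((fun i => PySem.Str.join " " (PySem.List.slice ws (some i) (some (i + 2)))) ∘ fun k : Nat => (0 : Int) + ↑k) k
        = (fun x => PySem.Str.join " " ((ws.drop x).take 2)) k := by
    intro k _
    simp [Function.comp, pv_slice2]
  rw [List.map_congr_left hc]
  simpa using h2

-- A's range/slice n-gram loop equals zip pairing, for n = 3
lemma pv_ngram3 (ws : List String) :
    (PySem.List.pyRange 0 (PySem.List.len ws - 3 + 1) 1).foldl
        (fun acc i => acc ++ [PySem.Str.join " " (PySem.List.slice ws (some i) (some (i + 3)))]) []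
      = (ws.zip ((ws.drop 1).zip (ws.drop 2))).map (fun t => PySem.Str.join " " [t.1, t.2.1, t.2.2]) := by
  rw [PySem.List.foldl_append_singleton_eq_map, PySem.List.pyRange_one, List.map_map]
  have hlen : (PySem.List.len ws - 3 + 1 - 0).toNat = ws.length - 2 := by
    simp [PySem.List.len_eq]; omega
  rw [hlen]
  have h3 := congrArg (List.map (fun w => PySem.Str.join " " w)) (pv_zip3 ws)
  simp only [List.map_map] at h3
  have hc : ∀ k ∈ List.range (ws.length - 2),
      ((fun i => PySem.Str.join " " (PySem.List.slice ws (some i) (some (i + 3)))) ∘ fun k : Nat => (0 : Int) + ↑k) k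
        = (fun x => PySem.Str.join " " ((ws.drop x).take 3)) k := by
    intro k _
    simp [Function.comp, pv_slice3]
  rw [List.map_congr_left hc]
  simpa using h3

-- extract_ngrams(text, 2) equals B's streaming bigrams over the kept words
lemma pv_extract_ngrams2 (text : String) :
    extract_ngrams text 2 = pvB none ((PySem.Str.split₀ text).filter (pvKeep 3)) := by
  unfold extract_ngrams
  set ws := (PySem.Str.split₀ text).filter (pvKeep 3) with hws
  rw [pvB_none]
  by_cases hstrip : PySem.Str.strip text = ""
  · rw [if_pos hstrip]
    have : ws = [] := by rw [hws, pv_split₀_of_strip_empty text hstrip]; rfl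
    simp [this]
  · rw [if_neg hstrip]
    by_cases hlen : PySem.List.len ws < 2
    · rw [if_pos hlen]
      have : ws.length < 2 := by simpa [PySem.List.len_eq] using hlen
      have hzip : ws.zip (ws.drop 1) = [] := by
        match ws, this with
        | [], _ => rfl
        | [a], _ => rfl
      rw [hzip]; rfl
    · rw [if_neg hlen, pv_ngram2 ws]
      exact List.map_congr_left (fun p _ => pvJoin2 p.1 p.2)

-- extract_ngrams(text, 3) equals B's streaming trigrams over the kept words
lemma pv_extract_ngrams3 (text : String) :
    extract_ngrams text 3 = pvT none none ((PySem.Str.split₀ text).filter (pvKeep 3)) := by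
  unfold extract_ngrams
  set ws := (PySem.Str.split₀ text).filter (pvKeep 3) with hws
  rw [pvT_none]
  by_cases hstrip : PySem.Str.strip text = ""
  · rw [if_pos hstrip]
    have : ws = [] := by rw [hws, pv_split₀_of_strip_empty text hstrip]; rfl
    simp [this]
  · rw [if_neg hstrip]
    by_cases hlen : PySem.List.len ws < 3
    · rw [if_pos hlen]
      have : ws.length < 3 := by simpa [PySem.List.len_eq] using hlen
      have hzip : ws.zip ((ws.drop 1).zip (ws.drop 2)) = [] := by
        match ws, this with
        | [], _ => rfl
        | [a], _ => rfl
        | [a, b], _ => rfl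
      rw [hzip]; rfl
    · rw [if_neg hlen, pv_ngram3 ws]
      exact List.map_congr_left (fun t _ => pvJoin3 t.1 t.2.1 t.2.2)

-- ===== VERDICT (by name: the statement is the Claim_ definition above) =====
theorem extract_all_terms_spec : Claim_equal_extract_all_terms := by
  intro text min_length _
  show extract_all_terms text min_length = extract_all_terms_alt text min_length
  unfold extract_all_terms extract_all_terms_alt
  dsimp only
  rw [PySem.List.foldl_append_if_eq_filter, pv_extract_ngrams2, pv_extract_ngrams3,
    pv_foldB]
  simp
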